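-- pv_equiv track=rewrite | github.com/DuarteCruz31/DigDug_AI | coiso.py | count_enemies_in_each_side
-- ===== SOURCE A (Python) =====
-- def count_enemies_in_each_side(digdug_x, digdug_y, enemies, rocks):
--     countR = 0
--     countL = 0
--     countT = 0
--     countB = 0
--
--     for enemy in enemies:
--         enemy_x, enemy_y = enemy["pos"]
--         if abs(enemy_x - digdug_x) <= 5 and abs(enemy_y - digdug_y) <= 5:
--             if enemy_x < digdug_x:
--                 countL += 1
--             elif enemy_x > digdug_x:
--                 countR += 1
--             elif enemy_y < digdug_y:
--                 countT += 1
--             elif enemy_y > digdug_y: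
--                 countB += 1
--
--     """ for rock in rocks:
--         rock_x, rock_y = rock["pos"]
--         if abs(rock_x - digdug_x) <= 5 and abs(rock_y - digdug_y) <= 5:
--             if rock_x < digdug_x:
--                 countL += 1
--             elif rock_x > digdug_x:
--                 countR += 1
--             elif rock_y < digdug_y:
--                 countT += 1
--             elif rock_y > digdug_y:
--                 countB += 1 """
--
--     return (countR, countL, countT, countB)
-- ===== SOURCE B (Python) =====
-- def count_enemies_in_each_side(digdug_x, digdug_y, enemies, rocks):
--     near = [enemy["pos"] for enemy in enemies
--             if abs(enemy["pos"][0] - digdug_x) <= 5 and abs(enemy["pos"][1] - digdug_y) <= 5]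
--     countL = sum(1 for x, y in near if x < digdug_x)
--     countR = sum(1 for x, y in near if x > digdug_x)
--     countT = sum(1 for x, y in near if x == digdug_x and y < digdug_y)
--     countB = sum(1 for x, y in near if x == digdug_x and y > digdug_y)
--     return (countR, countL, countT, countB)
-- ===== Notes on version B (the rewrite author's own statement) =====
-- stated objective: alternative
-- what changed: Replaces the single stateful pass (four mutable counters updated through an elif chain) by filtering the nearby positions once and then computing each of the four counts in its own shaped counting pass.
import Mathlib
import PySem

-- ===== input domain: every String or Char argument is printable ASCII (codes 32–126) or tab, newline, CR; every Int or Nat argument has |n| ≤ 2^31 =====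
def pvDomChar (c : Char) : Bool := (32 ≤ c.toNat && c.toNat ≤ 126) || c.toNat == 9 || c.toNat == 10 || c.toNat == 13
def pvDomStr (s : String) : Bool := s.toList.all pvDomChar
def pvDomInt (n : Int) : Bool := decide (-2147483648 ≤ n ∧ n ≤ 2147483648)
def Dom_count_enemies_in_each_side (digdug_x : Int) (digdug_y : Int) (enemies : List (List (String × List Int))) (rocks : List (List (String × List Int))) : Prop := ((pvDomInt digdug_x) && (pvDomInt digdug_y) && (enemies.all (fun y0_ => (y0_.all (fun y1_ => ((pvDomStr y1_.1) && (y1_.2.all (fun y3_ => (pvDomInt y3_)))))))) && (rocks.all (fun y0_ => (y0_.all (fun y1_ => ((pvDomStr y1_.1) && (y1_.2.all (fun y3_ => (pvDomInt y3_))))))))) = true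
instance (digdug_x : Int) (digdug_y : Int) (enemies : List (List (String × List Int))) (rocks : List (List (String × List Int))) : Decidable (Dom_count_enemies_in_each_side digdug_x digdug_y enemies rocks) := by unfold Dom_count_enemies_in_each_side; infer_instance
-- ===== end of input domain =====

-- B replaces A's single stateful pass (four counters, elif chain) by one filter of the
-- nearby positions followed by four independent counting passes (alternative decomposition).


-- ===== PORT A =====
-- B-side helper: the position of one enemy if it is within the 5×5 box, else none
def pvNearPos (digdug_x : Int) (digdug_y : Int) (enemy : List (String × List Int)) : Option (Int × Int) :=
  match (PySem.Dict.mk enemy).get? "pos" with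
  | some [x, y] =>
    if (x - digdug_x).natAbs ≤ 5 ∧ (y - digdug_y).natAbs ≤ 5 then some (x, y) else none
  | _ => none  -- Python raises here; excluded by Pre_

def count_enemies_in_each_side (digdug_x : Int) (digdug_y : Int) (enemies : List (List (String × List Int))) (rocks : List (List (String × List Int))) : Int × Int × Int × Int :=
  -- countR = countL = countT = countB = 0; for enemy in enemies: unpack enemy["pos"], branch
  let s := enemies.foldl (fun (st : Int × Int × Int × Int) enemy =>
    match (PySem.Dict.mk enemy).get? "pos" with
    | some [enemy_x, enemy_y] =>
      if (enemy_x - digdug_x).natAbs ≤ 5 ∧ (enemy_y - digdug_y).natAbs ≤ 5 then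
        if enemy_x < digdug_x then (st.1, st.2.1 + 1, st.2.2.1, st.2.2.2)
        else if enemy_x > digdug_x then (st.1 + 1, st.2.1, st.2.2.1, st.2.2.2)
        else if enemy_y < digdug_y then (st.1, st.2.1, st.2.2.1 + 1, st.2.2.2)
        else if enemy_y > digdug_y then (st.1, st.2.1, st.2.2.1, st.2.2.2 + 1)
        else st
      else st
    | _ => st  -- Python raises here; excluded by Pre_
    ) (0, 0, 0, 0)
  s

-- ===== PORT B =====
def count_enemies_in_each_side_alt (digdug_x : Int) (digdug_y : Int) (enemies : List (List (String × List Int))) (rocks : List (List (String × List Int))) : Int × Int × Int × Int :=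
  let near : List (Int × Int) := enemies.filterMap (pvNearPos digdug_x digdug_y)
  let countL : Int := near.countP (fun p => p.1 < digdug_x)
  let countR : Int := near.countP (fun p => p.1 > digdug_x)
  let countT : Int := near.countP (fun p => p.1 = digdug_x ∧ p.2 < digdug_y)
  let countB : Int := near.countP (fun p => p.1 = digdug_x ∧ p.2 > digdug_y)
  (countR, countL, countT, countB)

-- ===== PRECONDITION & SPEC =====
-- Pre_ excludes exactly the inputs on which Python A raises: an enemy dict without a
-- "pos" key (KeyError) or whose "pos" value is not a 2-element list (ValueError on unpack).
def Pre_count_enemies_in_each_side (digdug_x : Int) (digdug_y : Int) (enemies : List (List (String × List Int))) (rocks : List (List (String × List Int))) : Prop :=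
  ∀ enemy ∈ enemies, ((PySem.Dict.mk enemy).get? "pos").map List.length = some 2
instance (digdug_x : Int) (digdug_y : Int) (enemies : List (List (String × List Int))) (rocks : List (List (String × List Int))) : Decidable (Pre_count_enemies_in_each_side digdug_x digdug_y enemies rocks) := by unfold Pre_count_enemies_in_each_side; infer_instance
def pvWitness_count_enemies_in_each_side : Int × Int × (List (List (String × List Int))) × (List (List (String × List Int))) :=
  (0, 0, [[("pos", [1, 1])], [("pos", [0, -2])]], [])
def Spec_count_enemies_in_each_side (digdug_x : Int) (digdug_y : Int) (enemies : List (List (String × List Int))) (rocks : List (List (String × List Int))) (out : Int × Int × Int × Int) : Prop := out = count_enemies_in_each_side_alt digdug_x digdug_y enemies rocks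
instance (digdug_x : Int) (digdug_y : Int) (enemies : List (List (String × List Int))) (rocks : List (List (String × List Int))) (out : Int × Int × Int × Int) : Decidable (Spec_count_enemies_in_each_side digdug_x digdug_y enemies rocks out) := by unfold Spec_count_enemies_in_each_side; infer_instance

-- ===== CLAIM (what is proved, stated in full; the proofs are below) =====
def Claim_equal_count_enemies_in_each_side : Prop := ∀ (digdug_x : Int) (digdug_y : Int) (enemies : List (List (String × List Int))) (rocks : List (List (String × List Int))), Dom_count_enemies_in_each_side digdug_x digdug_y enemies rocks → Pre_count_enemies_in_each_side digdug_x digdug_y enemies rocks → Spec_count_enemies_in_each_side digdug_x digdug_y enemies rocks (count_enemies_in_each_side digdug_x digdug_y enemies rocks)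

-- ===== LEMMAS AND PROOFS =====
theorem witness_ok : Dom_count_enemies_in_each_side pvWitness_count_enemies_in_each_side.1 pvWitness_count_enemies_in_each_side.2.1 pvWitness_count_enemies_in_each_side.2.2.1 pvWitness_count_enemies_in_each_side.2.2.2 ∧ Pre_count_enemies_in_each_side pvWitness_count_enemies_in_each_side.1 pvWitness_count_enemies_in_each_side.2.1 pvWitness_count_enemies_in_each_side.2.2.1 pvWitness_count_enemies_in_each_side.2.2.2 := by
  constructor <;> decide

-- Loop invariant: A's fold from any starting state adds B's four counts componentwise.
theorem fold_invariant (dx dy : Int) (enemies : List (List (String × List Int)))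
    (st : Int × Int × Int × Int) :
    enemies.foldl (fun (st : Int × Int × Int × Int) enemy =>
      match (PySem.Dict.mk enemy).get? "pos" with
      | some [ex, ey] =>
        if (ex - dx).natAbs ≤ 5 ∧ (ey - dy).natAbs ≤ 5 then
          if ex < dx then (st.1, st.2.1 + 1, st.2.2.1, st.2.2.2)
          else if ex > dx then (st.1 + 1, st.2.1, st.2.2.1, st.2.2.2)
          else if ey < dy then (st.1, st.2.1, st.2.2.1 + 1, st.2.2.2)
          else if ey > dy then (st.1, st.2.1, st.2.2.1, st.2.2.2 + 1)
          else st
        else st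
      | _ => st) st =
    (let near : List (Int × Int) := enemies.filterMap (pvNearPos dx dy)
     (st.1 + near.countP (fun p => p.1 > dx),
      st.2.1 + near.countP (fun p => p.1 < dx),
      st.2.2.1 + near.countP (fun p => p.1 = dx ∧ p.2 < dy),
      st.2.2.2 + near.countP (fun p => p.1 = dx ∧ p.2 > dy))) := by
  induction enemies generalizing st with
  | nil => simp
  | cons e rest ih =>
    simp only [List.foldl_cons, List.filterMap_cons, pvNearPos]
    rcases hget : (PySem.Dict.mk e).get? "pos" with _ | v
    · simp [ih, pvNearPos]
    · match v with
      | [] => simp [ih, pvNearPos]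
      | [x] => simp [ih, pvNearPos]
      | x :: y :: z :: t => simp [ih, pvNearPos]
      | [x, y] =>
        by_cases hnear : (x - dx).natAbs ≤ 5 ∧ (y - dy).natAbs ≤ 5
        · simp only [if_pos hnear]
          rcases lt_trichotomy x dx with hx | hx | hx
          · simp [hx, not_lt.mpr (le_of_lt hx), ih, hx.ne, pvNearPos]
            omega
          · subst hx
            rcases lt_trichotomy y dy with hy | hy | hy
            · simp [hy, ih, List.countP_cons, pvNearPos]
              omega
            · subst hy
              simp [ih, pvNearPos]
            · simp [hy, not_lt.mpr (le_of_lt hy), ih, pvNearPos]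
              omega
          · simp [hx, not_lt.mpr (le_of_lt hx), ih, hx.ne', pvNearPos]
            omega
        · simp [if_neg hnear, ih, pvNearPos]

-- ===== VERDICT (by name: the statement is the Claim_ definition above) =====
theorem count_enemies_in_each_side_spec : Claim_equal_count_enemies_in_each_side := by
  intro dx dy enemies rocks _ _
  unfold Spec_count_enemies_in_each_side count_enemies_in_each_side count_enemies_in_each_side_alt
  simp only [fold_invariant]
  simp
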